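-- pv_equiv track=rewrite | github.com/ajpung/Custom_wordsearch | main.py | contains_bad_words
-- ===== SOURCE A (Python) =====
-- def contains_bad_words(grid, bad_words):
--     """Check if the grid contains any bad words."""
--     grid_size = len(grid)
--     all_words = set()
--
--     # Extract rows and columns
--     for row in grid:
--         all_words.add("".join(row))
--         all_words.add("".join(row[::-1]))
--
--     for col in range(grid_size):
--         column = "".join(grid[row][col] for row in range(grid_size))
--         all_words.add(column)
--         all_words.add(column[::-1])
--
--     # Extract diagonals
--     for offset in range(-grid_size + 1, grid_size):
--         diagonal = "".join(grid[row][col] for row in range(grid_size) for col in range(grid_size)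
--                            if row - col == offset)
--         all_words.add(diagonal)
--         all_words.add(diagonal[::-1])
--
--     # Check for bad words
--     for word in bad_words:
--         if word in all_words:
--             return True
--
--     return False
-- ===== SOURCE B (Python) =====
-- def contains_bad_words(grid, bad_words):
--     """Check if the grid contains any bad words."""
--     n = len(grid)
--     words = set()
--
--     # Rows (and reversed rows)
--     for row in grid:
--         words.add("".join(row))
--         words.add("".join(row[::-1]))
--
--     # One pass over the grid: bucket every cell by its column and by its
--     # row-col anti-index, so columns and all diagonals come out in O(n^2).
--     cols = {}
--     diags = {}
--     for r in range(n):
--         for c in range(n):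
--             cell = grid[r][c]
--             cols.setdefault(c, []).append(cell)
--             diags.setdefault(r - c, []).append(cell)
--
--     for c in range(n):
--         s = "".join(cols.get(c, []))
--         words.add(s)
--         words.add(s[::-1])
--
--     for o in range(1 - n, n):
--         s = "".join(diags.get(o, []))
--         words.add(s)
--         words.add(s[::-1])
--
--     return any(w in words for w in bad_words)
-- ===== Notes on version B (the rewrite author's own statement) =====
-- stated objective: faster
-- what changed: Instead of rescanning all n^2 cells once per diagonal offset, B makes a single pass over the grid bucketing every cell by its column and by its row-col difference (dicts of lists), then assembles columns and diagonals from the buckets.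
import Mathlib
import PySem

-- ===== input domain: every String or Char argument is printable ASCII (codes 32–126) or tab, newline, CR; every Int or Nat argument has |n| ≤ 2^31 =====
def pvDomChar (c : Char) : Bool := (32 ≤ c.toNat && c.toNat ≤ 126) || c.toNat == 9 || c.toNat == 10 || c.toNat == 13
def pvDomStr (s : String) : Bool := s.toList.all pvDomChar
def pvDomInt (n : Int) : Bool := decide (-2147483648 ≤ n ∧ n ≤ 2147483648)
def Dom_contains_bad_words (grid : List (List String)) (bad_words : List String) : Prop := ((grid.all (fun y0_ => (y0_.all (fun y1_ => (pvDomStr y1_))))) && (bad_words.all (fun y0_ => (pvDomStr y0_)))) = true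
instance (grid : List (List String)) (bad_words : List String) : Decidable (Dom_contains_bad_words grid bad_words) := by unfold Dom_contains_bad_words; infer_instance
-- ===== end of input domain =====

-- B replaces A's O(n^3) per-offset rescans of the whole grid by one O(n^2) pass that
-- buckets each cell by its column and by its row-col difference (measured faster).

-- grid[r][c]; exact under Pre_ (every index taken is then in range, so the defaults never fire)
def pvCell (grid : List (List String)) (r c : Int) : String :=
  PySem.List.pyGetD (PySem.List.pyGetD grid r []) c ""

-- ===== PORT A =====
def contains_bad_words (grid : List (List String)) (bad_words : List String) : Bool :=
  let n : Int := (grid.length : Int)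
  -- rows: all_words.add("".join(row)); all_words.add("".join(row[::-1]))
  let w1 : PySem.Set String := grid.foldl (fun s row =>
    PySem.Set.add (PySem.Set.add s (PySem.Str.join "" row))
      (PySem.Str.join "" ((PySem.List.slice? row none none (-1)).getD []))) PySem.Set.empty
  -- columns
  let w2 : PySem.Set String := (PySem.List.pyRange 0 n 1).foldl (fun s col =>
    let column := PySem.Str.join "" ((PySem.List.pyRange 0 n 1).map (fun row => pvCell grid row col))
    PySem.Set.add (PySem.Set.add s column) ((PySem.Str.slice? column none none (-1)).getD "")) w1
  -- diagonals: for offset in range(-n+1, n), scan every (row, col) and keep row-col == offset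
  let w3 : PySem.Set String := (PySem.List.pyRange (-n + 1) n 1).foldl (fun s offset =>
    let diagonal := PySem.Str.join "" ((PySem.List.pyRange 0 n 1).flatMap (fun row =>
      ((PySem.List.pyRange 0 n 1).filter (fun col => row - col == offset)).map
        (fun col => pvCell grid row col)))
    PySem.Set.add (PySem.Set.add s diagonal) ((PySem.Str.slice? diagonal none none (-1)).getD "")) w2
  -- for word in bad_words: if word in all_words: return True / return False
  bad_words.any (fun word => PySem.Set.contains w3 word)

-- ===== PORT B =====
def contains_bad_words_alt (grid : List (List String)) (bad_words : List String) : Bool :=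
  let n : Int := (grid.length : Int)
  -- rows
  let words0 : PySem.Set String := grid.foldl (fun s row =>
    PySem.Set.add (PySem.Set.add s (PySem.Str.join "" row))
      (PySem.Str.join "" ((PySem.List.slice? row none none (-1)).getD []))) PySem.Set.empty
  -- one pass: cols.setdefault(c, []).append(cell); diags.setdefault(r - c, []).append(cell)
  let cd : PySem.Dict Int (List String) × PySem.Dict Int (List String) :=
    (PySem.List.pyRange 0 n 1).foldl (fun cd r =>
      (PySem.List.pyRange 0 n 1).foldl (fun cd c =>
        (cd.1.modify c [] (· ++ [pvCell grid r c]),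
         cd.2.modify (r - c) [] (· ++ [pvCell grid r c]))) cd)
      (PySem.Dict.empty, PySem.Dict.empty)
  let words1 : PySem.Set String := (PySem.List.pyRange 0 n 1).foldl (fun s c =>
    let str := PySem.Str.join "" (cd.1.getD c [])
    PySem.Set.add (PySem.Set.add s str) ((PySem.Str.slice? str none none (-1)).getD "")) words0
  let words2 : PySem.Set String := (PySem.List.pyRange (1 - n) n 1).foldl (fun s o =>
    let str := PySem.Str.join "" (cd.2.getD o [])
    PySem.Set.add (PySem.Set.add s str) ((PySem.Str.slice? str none none (-1)).getD "")) words1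
  bad_words.any (fun word => PySem.Set.contains words2 word)

-- ===== PRECONDITION & SPEC =====
-- Pre_ excludes exactly the inputs where Python A raises IndexError: a row shorter than the
-- number of rows makes grid[row][col] fail during column/diagonal extraction.
def Pre_contains_bad_words (grid : List (List String)) (bad_words : List String) : Prop :=
  ∀ row ∈ grid, grid.length ≤ row.length
instance (grid : List (List String)) (bad_words : List String) : Decidable (Pre_contains_bad_words grid bad_words) := by unfold Pre_contains_bad_words; infer_instance
def pvWitness_contains_bad_words : List (List String) × List String :=
  ([["a", "b"], ["c", "d"]], ["db", "zz"])

def Spec_contains_bad_words (grid : List (List String)) (bad_words : List String) (out : Bool) : Prop := out = contains_bad_words_alt grid bad_words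
instance (grid : List (List String)) (bad_words : List String) (out : Bool) : Decidable (Spec_contains_bad_words grid bad_words out) := by unfold Spec_contains_bad_words; infer_instance

-- ===== CLAIM (what is proved, stated in full; the proofs are below) =====
def Claim_equal_contains_bad_words : Prop := ∀ (grid : List (List String)) (bad_words : List String), Dom_contains_bad_words grid bad_words → Pre_contains_bad_words grid bad_words → Spec_contains_bad_words grid bad_words (contains_bad_words grid bad_words)

-- ===== LEMMAS AND PROOFS =====

-- a strictly increasing (hence Nodup) range filtered for equality with a member is that singleton
lemma pv_filter_pyRange_eq (a b x : Int) (h1 : a ≤ x) (h2 : x < b) :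
    (PySem.List.pyRange a b 1).filter (fun c => c == x) = [x] := by
  rw [List.filter_beq,
    List.count_eq_one_of_mem (PySem.List.nodup_pyRange_one a b)
      ((PySem.List.mem_pyRange_one).2 ⟨h1, h2⟩)]
  rfl

-- B's column bucket c holds exactly A's column c (for 0 ≤ c < n)
lemma pv_cols_bucket (grid : List (List String)) (n c : Int) (h1 : 0 ≤ c) (h2 : c < n) :
    (((PySem.List.pyRange 0 n 1).foldl (fun d r =>
        (PySem.List.pyRange 0 n 1).foldl
          (fun d c => d.modify c [] (· ++ [pvCell grid r c])) d)
      (PySem.Dict.empty : PySem.Dict Int (List String))).getD c [])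
    = (PySem.List.pyRange 0 n 1).map (fun r => pvCell grid r c) := by
  have hinner : ∀ (r : Int) (d : PySem.Dict Int (List String)),
      (PySem.List.pyRange 0 n 1).foldl
        (fun d c => d.modify c [] (· ++ [pvCell grid r c])) d
      = ((PySem.List.pyRange 0 n 1).map (fun c => (c, pvCell grid r c))).foldl
          (fun d p => d.modify p.1 [] (· ++ [p.2])) d := by
    intro r d; rw [List.foldl_map]
  calc
    _ = (((PySem.List.pyRange 0 n 1).flatMap (fun r =>
          (PySem.List.pyRange 0 n 1).map (fun c => (c, pvCell grid r c)))).foldl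
            (fun d p => d.modify p.1 [] (· ++ [p.2]))
            (PySem.Dict.empty : PySem.Dict Int (List String))).getD c [] := by
        rw [List.foldl_flatMap]
        congr 1
        exact PySem.List.foldl_congr_mem _ _ _ _ (fun d r _ => hinner r d)
    _ = _ := by
        rw [PySem.Dict.getD_foldl_modify_append]
        simp only [PySem.Dict.getD_empty, List.nil_append, List.filter_flatMap,
          List.filter_map, List.map_flatMap, List.map_map]
        rw [List.flatMap_congr (fun r _ => by
          rw [show (fun p => p.1 == c) ∘ (fun x => (x, pvCell grid r x)) = (fun x => x == c) from rfl,
            pv_filter_pyRange_eq 0 n c h1 h2])]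
        exact List.map_eq_flatMap.symm

-- B's diagonal bucket o holds exactly A's diagonal for offset o (any o)
lemma pv_diags_bucket (grid : List (List String)) (n o : Int) :
    (((PySem.List.pyRange 0 n 1).foldl (fun d r =>
        (PySem.List.pyRange 0 n 1).foldl
          (fun d c => d.modify (r - c) [] (· ++ [pvCell grid r c])) d)
      (PySem.Dict.empty : PySem.Dict Int (List String))).getD o [])
    = (PySem.List.pyRange 0 n 1).flatMap (fun r =>
        ((PySem.List.pyRange 0 n 1).filter (fun c => r - c == o)).map
          (fun c => pvCell grid r c)) := by
  have hinner : ∀ (r : Int) (d : PySem.Dict Int (List String)),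
      (PySem.List.pyRange 0 n 1).foldl
        (fun d c => d.modify (r - c) [] (· ++ [pvCell grid r c])) d
      = ((PySem.List.pyRange 0 n 1).map (fun c => (r - c, pvCell grid r c))).foldl
          (fun d p => d.modify p.1 [] (· ++ [p.2])) d := by
    intro r d; rw [List.foldl_map]
  calc
    _ = (((PySem.List.pyRange 0 n 1).flatMap (fun r =>
          (PySem.List.pyRange 0 n 1).map (fun c => (r - c, pvCell grid r c)))).foldl
            (fun d p => d.modify p.1 [] (· ++ [p.2]))
            (PySem.Dict.empty : PySem.Dict Int (List String))).getD o [] := by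
        rw [List.foldl_flatMap]
        congr 1
        exact PySem.List.foldl_congr_mem _ _ _ _ (fun d r _ => hinner r d)
    _ = _ := by
        rw [PySem.Dict.getD_foldl_modify_append]
        simp only [PySem.Dict.getD_empty, List.nil_append, List.filter_flatMap,
          List.filter_map, List.map_flatMap, List.map_map]
        rfl

-- ===== VERDICT (by name: the statement is the Claim_ definition above) =====
set_option maxHeartbeats 1000000 in
theorem contains_bad_words_spec : Claim_equal_contains_bad_words := by
  intro grid bad_words _ _
  simp only [Spec_contains_bad_words, contains_bad_words, contains_bad_words_alt]
  have hsplit :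
      (PySem.List.pyRange 0 (grid.length : Int) 1).foldl (fun cd r =>
        (PySem.List.pyRange 0 (grid.length : Int) 1).foldl (fun cd c =>
          (cd.1.modify c [] (· ++ [pvCell grid r c]),
           cd.2.modify (r - c) [] (· ++ [pvCell grid r c]))) cd)
        ((PySem.Dict.empty : PySem.Dict Int (List String)),
         (PySem.Dict.empty : PySem.Dict Int (List String)))
      = ((PySem.List.pyRange 0 (grid.length : Int) 1).foldl (fun d r =>
            (PySem.List.pyRange 0 (grid.length : Int) 1).foldl
              (fun d c => d.modify c [] (· ++ [pvCell grid r c])) d) PySem.Dict.empty,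
         (PySem.List.pyRange 0 (grid.length : Int) 1).foldl (fun d r =>
            (PySem.List.pyRange 0 (grid.length : Int) 1).foldl
              (fun d c => d.modify (r - c) [] (· ++ [pvCell grid r c])) d) PySem.Dict.empty) := by
    have hin : (fun (cd : PySem.Dict Int (List String) × PySem.Dict Int (List String)) (r : Int) =>
        (PySem.List.pyRange 0 (grid.length : Int) 1).foldl (fun cd c =>
          (cd.1.modify c [] (· ++ [pvCell grid r c]),
           cd.2.modify (r - c) [] (· ++ [pvCell grid r c]))) cd)
        = (fun cd r =>
          ((PySem.List.pyRange 0 (grid.length : Int) 1).foldl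
              (fun d c => d.modify c [] (· ++ [pvCell grid r c])) cd.1,
           (PySem.List.pyRange 0 (grid.length : Int) 1).foldl
              (fun d c => d.modify (r - c) [] (· ++ [pvCell grid r c])) cd.2)) := by
      funext cd r
      obtain ⟨a, b⟩ := cd
      exact PySem.List.foldl_prod_mk
        (fun (d : PySem.Dict Int (List String)) c => d.modify c [] (· ++ [pvCell grid r c]))
        (fun (d : PySem.Dict Int (List String)) c => d.modify (r - c) [] (· ++ [pvCell grid r c]))
        _ a b
    rw [hin]
    exact PySem.List.foldl_prod_mk
      (fun (d : PySem.Dict Int (List String)) r => (PySem.List.pyRange 0 (grid.length : Int) 1).foldl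
        (fun d c => d.modify c [] (· ++ [pvCell grid r c])) d)
      (fun (d : PySem.Dict Int (List String)) r => (PySem.List.pyRange 0 (grid.length : Int) 1).foldl
        (fun d c => d.modify (r - c) [] (· ++ [pvCell grid r c])) d) _ _ _
  rw [hsplit]
  refine congrArg (fun s : PySem.Set String => bad_words.any (fun word => PySem.Set.contains s word)) ?_
  have hneg : (-(grid.length : Int) + 1) = 1 - (grid.length : Int) := by ring
  rw [hneg]
  have hcols :
      (PySem.List.pyRange 0 (grid.length : Int) 1).foldl (fun s col =>
        PySem.Set.add (PySem.Set.add s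
            (PySem.Str.join "" ((PySem.List.pyRange 0 (grid.length : Int) 1).map
              (fun row => pvCell grid row col))))
          ((PySem.Str.slice? (PySem.Str.join ""
              ((PySem.List.pyRange 0 (grid.length : Int) 1).map
                (fun row => pvCell grid row col))) none none (-1)).getD ""))
        (grid.foldl (fun s row =>
          PySem.Set.add (PySem.Set.add s (PySem.Str.join "" row))
            (PySem.Str.join "" ((PySem.List.slice? row none none (-1)).getD []))) PySem.Set.empty)
      = (PySem.List.pyRange 0 (grid.length : Int) 1).foldl (fun s c =>
          PySem.Set.add (PySem.Set.add s (PySem.Str.join ""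
              (((PySem.List.pyRange 0 (grid.length : Int) 1).foldl (fun d r =>
                  (PySem.List.pyRange 0 (grid.length : Int) 1).foldl
                    (fun d c => d.modify c [] (· ++ [pvCell grid r c])) d)
                PySem.Dict.empty).getD c [])))
            ((PySem.Str.slice? (PySem.Str.join ""
                (((PySem.List.pyRange 0 (grid.length : Int) 1).foldl (fun d r =>
                    (PySem.List.pyRange 0 (grid.length : Int) 1).foldl
                      (fun d c => d.modify c [] (· ++ [pvCell grid r c])) d)
                  PySem.Dict.empty).getD c [])) none none (-1)).getD ""))
          (grid.foldl (fun s row =>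
            PySem.Set.add (PySem.Set.add s (PySem.Str.join "" row))
              (PySem.Str.join "" ((PySem.List.slice? row none none (-1)).getD []))) PySem.Set.empty) := by
    apply PySem.List.foldl_congr_mem'
    intro c hc acc
    obtain ⟨h1, h2⟩ := (PySem.List.mem_pyRange_one).1 hc
    rw [pv_cols_bucket grid (grid.length : Int) c h1 h2]
  rw [hcols]
  apply PySem.List.foldl_congr_mem'
  intro o _ acc
  rw [pv_diags_bucket grid (grid.length : Int) o]
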